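-- pv_equiv track=rewrite | github.com/wadansyaku/band-part-key-app | core/measure_based_extractor.py | _group_into_systems
-- ===== SOURCE A (Python) =====
-- def _group_into_systems(labels):
--     """楽器をシステムにグループ化"""
--     if not labels:
--         return []
--
--     # Y座標でソート
--     sorted_labels = sorted(labels, key=lambda x: x['y'])
--
--     systems = []
--     current_system = [sorted_labels[0]]
--
--     for label in sorted_labels[1:]:
--         # 大きなギャップがあれば新しいシステム
--         if label['y'] - current_system[-1]['y'] > 200:
--             systems.append(current_system)
--             current_system = [label]
--         else:
--             current_system.append(label)
--
--     if current_system: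
--         systems.append(current_system)
--
--     return systems
-- ===== SOURCE B (Python) =====
-- def _group_into_systems(labels):
--     """楽器をシステムにグループ化 (divide and conquer on the sorted list)"""
--     if not labels:
--         return []
--     return _dc(sorted(labels, key=lambda x: x['y']))
--
--
-- def _dc(s):
--     """Group a sorted run: group each half recursively, then stitch the
--     halves together, merging the two boundary groups when their gap is small."""
--     if len(s) <= 1:
--         return [s]
--     mid = len(s) // 2
--     left = _dc(s[:mid])
--     right = _dc(s[mid:])
--     if right[0][0]['y'] - left[-1][-1]['y'] > 200:
--         return left + right
--     return left[:-1] + [left[-1] + right[0]] + right[1:]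
-- ===== Notes on version B (the rewrite author's own statement) =====
-- stated objective: alternative
-- what changed: Replaces A's single left-to-right scan that accumulates a growing current_system with a divide-and-conquer: recursively group each half of the sorted list, then stitch the two halves, merging the boundary groups when the gap across the split is <= 200.
import Mathlib
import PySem

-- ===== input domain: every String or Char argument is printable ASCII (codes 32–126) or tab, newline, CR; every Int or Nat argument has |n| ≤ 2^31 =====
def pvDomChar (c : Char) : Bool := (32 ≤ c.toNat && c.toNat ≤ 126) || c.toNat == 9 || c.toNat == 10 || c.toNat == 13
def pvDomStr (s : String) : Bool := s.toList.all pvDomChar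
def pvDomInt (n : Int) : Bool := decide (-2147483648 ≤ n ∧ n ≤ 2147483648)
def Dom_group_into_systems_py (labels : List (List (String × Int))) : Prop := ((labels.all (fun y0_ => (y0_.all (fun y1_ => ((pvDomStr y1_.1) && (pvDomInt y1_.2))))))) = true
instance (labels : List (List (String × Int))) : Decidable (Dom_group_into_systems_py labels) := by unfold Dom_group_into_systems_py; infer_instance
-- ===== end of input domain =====

-- B replaces A's left-to-right accumulating scan with a divide-and-conquer that groups each
-- half of the sorted list recursively and merges the boundary groups; objective: alternative.

-- ===== PORT A =====
-- label['y'] (dict lookup; Pre_ guarantees the key "y" is present, so the .getD default is never the value used)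
def getY (l : List (String × Int)) : Int := ((PySem.Dict.mk l).get? "y").getD 0

def group_into_systems_py (labels : List (List (String × Int))) : List (List (List (String × Int))) :=
  if labels.isEmpty then []
  else
    let sorted_labels := PySem.List.sorted labels (fun x => getY x) false
    let r := (PySem.List.slice sorted_labels (some 1) none).foldl
      (fun (st : List (List (List (String × Int))) × List (List (String × Int))) label =>
        if getY label - getY (PySem.List.pyGetD st.2 (-1) []) > 200 then
          (st.1 ++ [st.2], [label])
        else (st.1, st.2 ++ [label]))
      ([], [PySem.List.pyGetD sorted_labels 0 []])
    if r.2.isEmpty then r.1 else r.1 ++ [r.2]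

-- ===== PORT B =====
-- _dc: group a sorted run by recursion on halves (s[:mid], s[mid:]);
-- the Nat fuel (initialised to len s) only makes the same recursion structural: each
-- recursive call is on a strictly shorter slice, so the fuel is never exhausted.
def dcBF : Nat → List (List (String × Int)) → List (List (List (String × Int)))
  | 0, s => [s]
  | fuel + 1, s =>
    if s.length ≤ 1 then [s]
    else
      -- mid = len(s) // 2; left = _dc(s[:mid]); right = _dc(s[mid:])  (locals inlined)
      if getY (PySem.List.pyGetD (PySem.List.pyGetD (dcBF fuel (PySem.List.slice s (some (PySem.Int.floordiv (s.length : Int) 2)) none)) 0 []) 0 []) -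
         getY (PySem.List.pyGetD (PySem.List.pyGetD (dcBF fuel (PySem.List.slice s none (some (PySem.Int.floordiv (s.length : Int) 2)))) (-1) []) (-1) []) > 200 then
        dcBF fuel (PySem.List.slice s none (some (PySem.Int.floordiv (s.length : Int) 2))) ++
          dcBF fuel (PySem.List.slice s (some (PySem.Int.floordiv (s.length : Int) 2)) none)
      else
        PySem.List.slice (dcBF fuel (PySem.List.slice s none (some (PySem.Int.floordiv (s.length : Int) 2)))) none (some (-1)) ++
          [PySem.List.pyGetD (dcBF fuel (PySem.List.slice s none (some (PySem.Int.floordiv (s.length : Int) 2)))) (-1) [] ++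
           PySem.List.pyGetD (dcBF fuel (PySem.List.slice s (some (PySem.Int.floordiv (s.length : Int) 2)) none)) 0 []] ++
          PySem.List.slice (dcBF fuel (PySem.List.slice s (some (PySem.Int.floordiv (s.length : Int) 2)) none)) (some 1) none

def dcB (s : List (List (String × Int))) : List (List (List (String × Int))) := dcBF s.length s

def group_into_systems_py_alt (labels : List (List (String × Int))) : List (List (List (String × Int))) :=
  if labels.isEmpty then []
  else dcB (PySem.List.sorted labels (fun x => getY x) false)

-- ===== PRECONDITION & SPEC =====
-- Pre_ excludes exactly the labels lacking a "y" key, on which the Python A raises KeyError.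
def Pre_group_into_systems_py (labels : List (List (String × Int))) : Prop :=
  ∀ l ∈ labels, ((PySem.Dict.mk l).get? "y").isSome = true
instance (labels : List (List (String × Int))) : Decidable (Pre_group_into_systems_py labels) := by
  unfold Pre_group_into_systems_py; infer_instance

def pvWitness_group_into_systems_py : (List (List (String × Int))) := [[("y", 0)], [("y", 300)]]

def Spec_group_into_systems_py (labels : List (List (String × Int))) (out : List (List (List (String × Int)))) : Prop := out = group_into_systems_py_alt labels
instance (labels : List (List (String × Int))) (out : List (List (List (String × Int)))) : Decidable (Spec_group_into_systems_py labels out) := by unfold Spec_group_into_systems_py; infer_instance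

-- ===== CLAIM (what is proved, stated in full; the proofs are below) =====
def Claim_equal_group_into_systems_py : Prop := ∀ (labels : List (List (String × Int))), Dom_group_into_systems_py labels → Pre_group_into_systems_py labels → Spec_group_into_systems_py labels (group_into_systems_py labels)

-- ===== LEMMAS AND PROOFS =====


theorem dropLast_cons_concat {α : Type} (x : α) (A : List α) (a : α) :
    (x :: (A ++ [a])).dropLast = x :: A := by
  rw [← List.cons_append, List.dropLast_concat]

theorem getLast?_cons_concat {α : Type} (x : α) (A : List α) (a : α) :
    (x :: (A ++ [a])).getLast? = some a := by
  rw [← List.cons_append, List.getLast?_concat]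

theorem concat_of_ne_nil {α : Type} (l : List α) (h : l ≠ []) : ∃ A a, l = A ++ [a] := by
  rcases List.eq_nil_or_concat l with h0 | ⟨L, b, h0⟩
  · exact absurd h0 h
  · exact ⟨L, b, by simpa [List.concat_eq_append] using h0⟩

-- the common grouping of a sorted list, by recursion on the structure
def grp (x : List (String × Int)) : List (List (String × Int)) → List (List (List (String × Int)))
  | [] => [[x]]
  | y :: ys => if getY y - getY x > 200 then [x] :: grp y ys else (grp y ys).modifyHead (x :: ·)

-- A's fold, characterised by grp
theorem foldA : ∀ (xs : List (List (String × Int))) (c : List (List (String × Int))) (p : List (String × Int)) (sys : List (List (List (String × Int)))),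
    (let r := xs.foldl
      (fun (st : List (List (List (String × Int))) × List (List (String × Int))) label =>
        if getY label - getY (PySem.List.pyGetD st.2 (-1) []) > 200 then
          (st.1 ++ [st.2], [label])
        else (st.1, st.2 ++ [label])) (sys, c ++ [p]);
     if r.2.isEmpty then r.1 else r.1 ++ [r.2]) = sys ++ (grp p xs).modifyHead (c ++ ·)
  | [], c, p, sys => by
    simp [grp]
  | x :: xs, c, p, sys => by
    simp only [List.foldl_cons]
    rw [PySem.List.pyGetD_neg_one_append_singleton]
    by_cases hg : getY x - getY p > 200
    · rw [if_pos hg]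
      have h := foldA xs [] x (sys ++ [c ++ [p]])
      have hid : (fun g : List (List (String × Int)) => [] ++ g) = id := by funext g; rfl
      rw [hid, List.modifyHead_id, id_eq, List.nil_append] at h
      rw [h]
      simp [grp, hg, List.append_assoc]
    · rw [if_neg hg]
      have h := foldA xs (c ++ [p]) x sys
      rw [h]
      simp only [grp, hg, ite_false, List.modifyHead_modifyHead]
      have hfun : (fun g => (c ++ [p]) ++ g) =
          ((fun g => c ++ g) ∘ (fun g => p :: g) :
            List (List (String × Int)) → List (List (String × Int))) := by
        funext g; simp
      rw [hfun]

theorem grp_ne_nil : ∀ (t : List (List (String × Int))) (x : List (String × Int)), grp x t ≠ []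
  | [], x => by simp [grp]
  | y :: ys, x => by
    simp only [grp]
    split
    · simp
    · have := grp_ne_nil ys y
      cases h : grp y ys with
      | nil => exact absurd h this
      | cons a l => simp

-- first element of the first group is the head of the input
theorem grp_head : ∀ (t : List (List (String × Int))) (x : List (String × Int)),
    ∃ r gs, grp x t = (x :: r) :: gs
  | [], x => ⟨[], [], rfl⟩
  | y :: ys, x => by
    obtain ⟨r, gs, h⟩ := grp_head ys y
    simp only [grp]
    split
    · exact ⟨[], grp y ys, rfl⟩
    · exact ⟨y :: r, gs, by rw [h]; rfl⟩

-- last element of the last group is the last element of the input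
theorem grp_last : ∀ (t : List (List (String × Int))) (x : List (String × Int)),
    ∃ gs g, grp x t = gs ++ [g ++ [(x :: t).getLast (List.cons_ne_nil x t)]]
  | [], x => ⟨[], [], rfl⟩
  | y :: ys, x => by
    obtain ⟨gs, g, h⟩ := grp_last ys y
    have hlast : (x :: y :: ys).getLast (List.cons_ne_nil x (y :: ys))
        = (y :: ys).getLast (List.cons_ne_nil y ys) := List.getLast_cons _
    simp only [grp]
    split
    · exact ⟨[x] :: gs, g, by rw [h, hlast]; rfl⟩
    · rw [h, hlast]
      cases gs with
      | nil => exact ⟨[], x :: g, by simp⟩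
      | cons a l => exact ⟨(x :: a) :: l, g, by simp⟩

-- stitching lemma: grouping a list split at some point
theorem grp_append : ∀ (xt : List (List (String × Int))) (x y : List (String × Int)) (yt : List (List (String × Int))),
    grp x (xt ++ y :: yt) =
      if getY y - getY ((x :: xt).getLast (List.cons_ne_nil x xt)) > 200
      then grp x xt ++ grp y yt
      else (grp x xt).dropLast ++ ((grp x xt).getLastD [] ++ (grp y yt).headD []) :: (grp y yt).tail
  | [], x, y, yt => by
    obtain ⟨r, gs, h⟩ := grp_head yt y
    simp only [List.nil_append, List.getLast_singleton]
    by_cases hg : getY y - getY x > 200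
    · simp [grp, hg]
    · simp [grp, hg, h]
  | z :: zs, x, y, yt => by
    have ih := grp_append zs z y yt
    have hlast : ((x :: z :: zs).getLast (List.cons_ne_nil x (z :: zs)))
        = (z :: zs).getLast (List.cons_ne_nil z zs) := List.getLast_cons _
    rw [List.cons_append]
    show grp x (z :: (zs ++ y :: yt)) = _
    simp only [grp, ih, hlast]
    obtain ⟨A, a, hA⟩ := concat_of_ne_nil (grp z zs) (grp_ne_nil zs z)
    obtain ⟨r, gs, hR⟩ := grp_head yt y
    by_cases hxz : getY z - getY x > 200
    · simp only [hxz, if_pos]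
      by_cases hC : getY y - getY ((z :: zs).getLast (List.cons_ne_nil z zs)) > 200
      · simp [hC]
      · simp only [hC, ite_false]
        rw [hA, hR]
        simp [dropLast_cons_concat, getLast?_cons_concat]
    · simp only [hxz, ite_false]
      by_cases hC : getY y - getY ((z :: zs).getLast (List.cons_ne_nil z zs)) > 200
      · simp only [hC, if_pos]
        rw [hA]
        cases A with
        | nil => simp
        | cons a0 A' => simp
      · simp only [hC, ite_false]
        rw [hA, hR]
        cases A with
        | nil => simp
        | cons a0 A' => simp [dropLast_cons_concat, getLast?_cons_concat]

-- the divide-and-conquer equals the structural grouping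
theorem dcBF_eq_grp : ∀ (n : Nat) (x : List (String × Int)) (t : List (List (String × Int))),
    (x :: t).length ≤ n → dcBF n (x :: t) = grp x t := by
  intro n
  induction n with
  | zero => intro x t h; simp at h
  | succ n ih =>
    intro x t hlen
    by_cases h1 : (x :: t).length ≤ 1
    · have ht : t = [] := by
        cases t with
        | nil => rfl
        | cons a l => simp at h1
      subst ht
      simp only [dcBF]
      simp [grp]
    · simp only [dcBF]
      rw [if_neg h1]
      have hpos : (0 : Int) < 2 := by omega
      have hfd : PySem.Int.floordiv ((x :: t).length : Int) 2 = ((x :: t).length : Int) / 2 :=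
        PySem.Int.floordiv_eq_ediv_of_pos hpos
      set s := x :: t with hs
      have hslen : s.length = t.length + 1 := by simp [hs]
      have h2 : 2 ≤ s.length := by omega
      set k : Nat := s.length / 2 with hk
      have hk1 : 1 ≤ k := by omega
      have hklt : k ≤ s.length - 1 := by omega
      have htonat : (PySem.Int.floordiv (s.length : Int) 2).toNat = k := by
        rw [hfd]; omega
      have hnn : (0:Int) ≤ PySem.Int.floordiv (s.length : Int) 2 := by rw [hfd]; omega
      rw [PySem.List.slice_to _ hnn, PySem.List.slice_from _ hnn, htonat]
      have htake : s.take k = x :: t.take (k - 1) := by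
        rw [hs]
        cases hk0 : k with
        | zero => omega
        | succ m =>
          simp only [List.take_succ_cons]
          congr 1
      have hdropne : s.drop k ≠ [] := by
        intro hcon
        have := List.length_drop (l := s) (i := k)
        rw [hcon] at this
        simp at this
        omega
      obtain ⟨yr, hyr⟩ := List.exists_cons_of_ne_nil hdropne
      obtain ⟨rest, hrest⟩ := hyr
      have hdrop : s.drop k = yr :: rest := hrest
      have hLlen : (x :: t.take (k - 1)).length ≤ n := by
        simp only [List.length_cons, List.length_take]
        omega
      have hRlen : (yr :: rest).length ≤ n := by
        have := List.length_drop (l := s) (i := k)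
        rw [hdrop] at this
        simp only [List.length_cons] at this ⊢
        omega
      rw [htake, hdrop]
      rw [ih x _ hLlen, ih yr rest hRlen]
      have hsplit : t = t.take (k - 1) ++ yr :: rest := by
        have : s.take k ++ s.drop k = s := List.take_append_drop k s
        rw [htake, hdrop, hs] at this
        simpa using this.symm
      have hmain := grp_append (t.take (k - 1)) x yr rest
      rw [← hsplit] at hmain
      -- reduce the indexing expressions
      obtain ⟨A, a, hA⟩ := concat_of_ne_nil (grp x (t.take (k - 1))) (grp_ne_nil _ x)
      obtain ⟨r, gs, hR⟩ := grp_head rest yr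
      -- last element of a: from grp_last
      obtain ⟨gs', g', hA'⟩ := grp_last (t.take (k - 1)) x
      -- value of the condition pieces
      have hRight0 : PySem.List.pyGetD (PySem.List.pyGetD (grp yr rest) 0 []) 0 [] = yr := by
        rw [hR]
        simp [PySem.List.pyGetD_zero_cons]
      have hLeftLast : PySem.List.pyGetD (PySem.List.pyGetD (grp x (t.take (k - 1))) (-1) []) (-1) []
          = (x :: t.take (k - 1)).getLast (List.cons_ne_nil x _) := by
        rw [hA']
        rw [PySem.List.pyGetD_neg_one_append_singleton, PySem.List.pyGetD_neg_one_append_singleton]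
      rw [hRight0, hLeftLast, hmain]
      by_cases hC : getY yr - getY ((x :: t.take (k - 1)).getLast (List.cons_ne_nil x _)) > 200
      · simp [hC]
      · simp only [hC, ite_false]
        rw [PySem.List.slice_to_neg_one, PySem.List.slice_from_one, hA, hR]
        simp

-- ===== VERDICT (by name: the statement is the Claim_ definition above) =====
theorem group_into_systems_py_spec : Claim_equal_group_into_systems_py := by
  intro labels _ _
  unfold Spec_group_into_systems_py group_into_systems_py group_into_systems_py_alt
  by_cases hne : labels.isEmpty
  · simp [hne]
  · simp only [hne, Bool.false_eq_true, if_false]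
    have hnil : PySem.List.sorted labels (fun x => getY x) false ≠ [] := by
      have hl := PySem.List.length_sorted labels (fun x => getY x) false
      intro hcon
      rw [hcon] at hl
      simp only [List.length_nil] at hl
      have hnl : labels = [] := List.eq_nil_of_length_eq_zero (by simpa using hl.symm)
      rw [hnl] at hne
      simp at hne
    obtain ⟨h, t, hs⟩ := List.exists_cons_of_ne_nil hnil
    rw [hs]
    rw [show dcB (h :: t) = dcBF (h :: t).length (h :: t) from rfl,
      dcBF_eq_grp (h :: t).length h t le_rfl]
    simp only [PySem.List.slice_from_one, List.tail_cons, PySem.List.pyGetD_zero_cons]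
    have hA := foldA t [] h []
    have hid : (fun g : List (List (String × Int)) => [] ++ g) = id := by funext g; rfl
    rw [hid, List.modifyHead_id, id_eq, List.nil_append] at hA
    exact hA
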